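-- pv_equiv track=rewrite | github.com/coolplayagent/relay-teams | src/relay_teams/agents/tasks/models.py | _split_windows_command_string
-- ===== SOURCE A (Python) =====
-- def _split_windows_command_string(value: str) -> tuple[str, ...]:
--     args: list[str] = []
--     current: list[str] = []
--     in_quotes = False
--     arg_started = False
--     index = 0
--     length = len(value)
--     while index < length:
--         char = value[index]
--         if char in {" ", "\t"} and not in_quotes:
--             if arg_started:
--                 args.append("".join(current))
--                 current = []
--                 arg_started = False
--             index += 1
--             continue
--         if char == "\\":
--             slash_count = 0
--             while index < length and value[index] == "\\":
--                 slash_count += 1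
--                 index += 1
--             if index < length and value[index] == '"':
--                 current.extend("\\" * (slash_count // 2))
--                 if slash_count % 2 == 1:
--                     current.append('"')
--                 else:
--                     in_quotes = not in_quotes
--                 arg_started = True
--                 index += 1
--                 continue
--             current.extend("\\" * slash_count)
--             arg_started = True
--             continue
--         if char == '"':
--             in_quotes = not in_quotes
--             arg_started = True
--             index += 1
--             continue
--         current.append(char)
--         arg_started = True
--         index += 1
--     if arg_started:
--         args.append("".join(current))
--     return tuple(args)
-- ===== SOURCE B (Python) =====
-- def _split_windows_command_string(value: str) -> tuple[str, ...]:
--     # Flat single-pass state machine: a pending backslash counter replaces A's inner run-scanning loop.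
--     args: list[str] = []
--     current: list[str] = []
--     in_quotes = False
--     arg_started = False
--     backslashes = 0
--     for char in value:
--         if char == "\\":
--             backslashes += 1
--             arg_started = True
--         elif char == '"':
--             current.extend("\\" * (backslashes // 2))
--             if backslashes % 2 == 1:
--                 current.append('"')
--             else:
--                 in_quotes = not in_quotes
--             backslashes = 0
--             arg_started = True
--         else:
--             current.extend("\\" * backslashes)
--             backslashes = 0
--             if char in (" ", "\t") and not in_quotes:
--                 if arg_started:
--                     args.append("".join(current))
--                     current = []
--                     arg_started = False
--             else:
--                 current.append(char)
--                 arg_started = True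
--     current.extend("\\" * backslashes)
--     if arg_started:
--         args.append("".join(current))
--     return tuple(args)
-- ===== Notes on version B (the rewrite author's own statement) =====
-- stated objective: simpler
-- what changed: Replaced A's index-driven while-loop with a nested backslash-run-scanning inner loop by a flat single-pass for-loop state machine that carries a pending backslash counter and flushes it on quote/other/end-of-string.
import Mathlib
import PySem

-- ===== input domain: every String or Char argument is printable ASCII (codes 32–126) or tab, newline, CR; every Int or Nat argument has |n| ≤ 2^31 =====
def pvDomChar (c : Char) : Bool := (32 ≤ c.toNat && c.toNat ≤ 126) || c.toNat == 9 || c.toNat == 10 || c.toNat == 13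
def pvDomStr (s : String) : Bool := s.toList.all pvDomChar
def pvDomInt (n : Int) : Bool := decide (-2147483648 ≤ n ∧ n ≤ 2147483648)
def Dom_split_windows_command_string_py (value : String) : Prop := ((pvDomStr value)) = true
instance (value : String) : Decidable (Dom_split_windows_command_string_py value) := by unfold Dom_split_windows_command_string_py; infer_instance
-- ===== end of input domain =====

-- B replaces A's inner backslash-run-scanning loop by a flat single-pass machine with a
-- pending backslash counter (objective: simpler single-pass decomposition, same O(n) cost).

-- ===== PORT A =====
-- A's inner `while value[index] == "\\"` loop: counts the leading backslashes, returns the rest.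
def pvCountRun : List Char → Nat × List Char
  | [] => (0, [])
  | c :: r => if c = '\\' then let p := pvCountRun r; (p.1 + 1, p.2) else (0, c :: r)

lemma pvCountRun_len (l : List Char) : (pvCountRun l).2.length ≤ l.length := by
  induction l with
  | nil => simp [pvCountRun]
  | cons c r ih => by_cases h : c = '\\' <;> simp [pvCountRun, h] <;> omega

def pvALoop (args : List String) (cur : List Char) (inq st : Bool) : List Char → List String
  | [] => if st then args ++ [String.ofList cur] else args
  | c :: rest =>
    if (c = ' ' ∨ c = '\t') ∧ inq = false then
      if st then pvALoop (args ++ [String.ofList cur]) [] inq false rest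
      else pvALoop args cur inq false rest
    else if c = '\\' then
      let p := pvCountRun rest
      let n := p.1 + 1
      if p.2.head? = some '"' then
        if n % 2 = 1 then pvALoop args (cur ++ List.replicate (n / 2) '\\' ++ ['"']) inq true p.2.tail
        else pvALoop args (cur ++ List.replicate (n / 2) '\\') (!inq) true p.2.tail
      else pvALoop args (cur ++ List.replicate n '\\') inq true p.2
    else if c = '"' then pvALoop args cur (!inq) true rest
    else pvALoop args (cur ++ [c]) inq true rest
termination_by l => l.length
decreasing_by
  all_goals
    (first
      | (simp; done)
      | (have h1 := pvCountRun_len rest; simp; omega))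

def split_windows_command_string_py (value : String) : List String :=
  pvALoop [] [] false false value.toList

-- ===== PORT B =====
def pvBLoop (args : List String) (cur : List Char) (inq st : Bool) (k : Nat) : List Char → List String
  | [] => if st then args ++ [String.ofList (cur ++ List.replicate k '\\')] else args
  | c :: rest =>
    if c = '\\' then pvBLoop args cur inq true (k + 1) rest
    else if c = '"' then
      let cur' := cur ++ List.replicate (k / 2) '\\'
      if k % 2 = 1 then pvBLoop args (cur' ++ ['"']) inq true 0 rest
      else pvBLoop args cur' (!inq) true 0 rest
    else
      let cur' := cur ++ List.replicate k '\\'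
      if (c = ' ' ∨ c = '\t') ∧ inq = false then
        if st then pvBLoop (args ++ [String.ofList cur']) [] inq false 0 rest
        else pvBLoop args cur' inq st 0 rest
      else pvBLoop args (cur' ++ [c]) inq true 0 rest

def split_windows_command_string_py_alt (value : String) : List String :=
  pvBLoop [] [] false false 0 value.toList

-- ===== PRECONDITION & SPEC =====
def Spec_split_windows_command_string_py (value : String) (out : List String) : Prop := out = split_windows_command_string_py_alt value
instance (value : String) (out : List String) : Decidable (Spec_split_windows_command_string_py value out) := by unfold Spec_split_windows_command_string_py; infer_instance

-- ===== CLAIM (what is proved, stated in full; the proofs are below) =====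
def Claim_equal_split_windows_command_string_py : Prop := ∀ (value : String), Dom_split_windows_command_string_py value → Spec_split_windows_command_string_py value (split_windows_command_string_py value)

-- ===== LEMMAS AND PROOFS =====

lemma pvCountRun_replicate (k : Nat) (l : List Char) (h : l.head? ≠ some '\\') :
    pvCountRun (List.replicate k '\\' ++ l) = (k, l) := by
  induction k with
  | zero =>
    cases l with
    | nil => simp [pvCountRun]
    | cons c r => simp at h; simp [pvCountRun, h]
  | succ n ih => simp [List.replicate_succ, pvCountRun, ih]

lemma pvRepCons (k : Nat) (a : Char) (r : List Char) :
    List.replicate k a ++ a :: r = a :: (List.replicate k a ++ r) := by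
  induction k with
  | zero => simp
  | succ m ihm => simp only [List.replicate_succ, List.cons_append, ihm]

-- A's backslash branch ignores the incoming arg_started flag.
lemma pvALoop_slash_st (args : List String) (cur : List Char) (inq st : Bool) (l : List Char) :
    pvALoop args cur inq st ('\\' :: l) = pvALoop args cur inq true ('\\' :: l) := by
  simp [pvALoop]

-- A on a run of n+1 backslashes followed by a non-backslash, non-quote head: flush and continue.
lemma pvALoop_slash_run (args : List String) (cur : List Char) (inq st : Bool) (n : Nat)
    (l : List Char) (hl : l.head? ≠ some '\\') (hq : l.head? ≠ some '"') :
    pvALoop args cur inq st ('\\' :: (List.replicate n '\\' ++ l)) =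
    pvALoop args (cur ++ List.replicate (n + 1) '\\') inq true l := by
  simp only [pvALoop]
  rw [pvCountRun_replicate n l hl]
  simp [hq]

-- A on a run of n+1 backslashes followed by a quote: halve, parity branch, continue after the quote.
lemma pvALoop_slash_quote (args : List String) (cur : List Char) (inq st : Bool) (n : Nat)
    (r : List Char) :
    pvALoop args cur inq st ('\\' :: (List.replicate n '\\' ++ '"' :: r)) =
    (if (n + 1) % 2 = 1 then pvALoop args (cur ++ List.replicate ((n + 1) / 2) '\\' ++ ['"']) inq true r
     else pvALoop args (cur ++ List.replicate ((n + 1) / 2) '\\') (!inq) true r) := by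
  simp only [pvALoop]
  rw [pvCountRun_replicate n ('"' :: r) (by simp)]
  simp

-- Invariant: B with pending counter k behaves like A facing k extra leading backslashes.
lemma pvMain (rest : List Char) : ∀ (args : List String) (cur : List Char) (inq st : Bool) (k : Nat),
    (k ≠ 0 → st = true) →
    pvBLoop args cur inq st k rest = pvALoop args cur inq st (List.replicate k '\\' ++ rest) := by
  induction rest with
  | nil =>
    intro args cur inq st k h
    cases k with
    | zero => simp [pvBLoop, pvALoop]
    | succ n =>
      rw [h (Nat.succ_ne_zero n), List.append_nil, List.replicate_succ]
      have hr := pvALoop_slash_run args cur inq true n [] (by simp) (by simp)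
      rw [List.append_nil] at hr
      rw [hr]
      simp [pvBLoop, pvALoop]
  | cons c r ih =>
    intro args cur inq st k h
    by_cases hc : c = '\\'
    · subst hc
      rw [show pvBLoop args cur inq st k ('\\' :: r) = pvBLoop args cur inq true (k + 1) r by
        simp [pvBLoop]]
      rw [ih args cur inq true (k + 1) (fun _ => rfl)]
      have h1 : List.replicate k '\\' ++ '\\' :: r = '\\' :: (List.replicate k '\\' ++ r) :=
        pvRepCons k '\\' r
      have h2 : List.replicate (k + 1) '\\' ++ r = '\\' :: (List.replicate k '\\' ++ r) := by
        rw [List.replicate_succ]; simp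
      rw [h1, h2]
      exact (pvALoop_slash_st args cur inq st _).symm
    · by_cases hq : c = '"'
      · subst hq
        cases k with
        | zero =>
          rw [show pvBLoop args cur inq st 0 ('"' :: r) = pvBLoop args cur (!inq) true 0 r by
            simp [pvBLoop]]
          rw [ih args cur (!inq) true 0 (by simp)]
          simp [pvALoop]
        | succ n =>
          rw [List.replicate_succ, List.cons_append, pvALoop_slash_quote]
          simp only [pvBLoop, if_neg (show ('"' : Char) = '\\' → False by simp),
            if_pos (rfl : ('"' : Char) = '"')]
          by_cases hp : (n + 1) % 2 = 1
          · simp only [hp, if_pos (rfl : (1:Nat) = 1), reduceIte]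
            simpa using ih _ _ _ true 0 (by simp)
          · rw [if_neg hp, if_neg hp]
            simpa using ih _ _ _ true 0 (by simp)
      · -- ordinary character (whitespace or plain): flush then one ordinary A step
        have hstep : ∀ (args' : List String) (cur' : List Char) (st' : Bool),
            pvBLoop args' cur' inq st' 0 (c :: r) = pvALoop args' cur' inq st' (c :: r) := by
          intro args' cur' st'
          by_cases hws : (c = ' ' ∨ c = '\t') ∧ inq = false
          · cases st' with
            | true =>
              simp only [pvBLoop, pvALoop, if_neg hc, if_neg hq, if_pos hws, if_pos rfl]
              rw [ih _ _ _ _ 0 (by simp)]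
              simp
            | false =>
              simp only [pvBLoop, pvALoop, if_neg hc, if_neg hq, if_pos hws]
              simp only [if_neg (Bool.false_ne_true), Bool.false_eq_true, if_false]
              rw [ih _ _ _ _ 0 (by simp)]
              simp
          · simp only [pvBLoop, pvALoop, if_neg hc, if_neg hq, if_neg hws]
            rw [ih _ _ _ _ 0 (by simp)]
            simp
        cases k with
        | zero => simpa using hstep args cur st
        | succ n =>
          rw [h (Nat.succ_ne_zero n), List.replicate_succ, List.cons_append,
            pvALoop_slash_run args cur inq true n (c :: r) (by simp [hc]) (by simp [hq])]
          rw [← hstep args (cur ++ List.replicate (n + 1) '\\') true]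
          by_cases hws : (c = ' ' ∨ c = '\t') ∧ inq = false
          · simp only [pvBLoop, if_neg hc, if_neg hq, if_pos hws, if_pos rfl]
            simp
          · simp only [pvBLoop, if_neg hc, if_neg hq, if_neg hws]
            simp

-- ===== VERDICT (by name: the statement is the Claim_ definition above) =====
theorem split_windows_command_string_py_spec : Claim_equal_split_windows_command_string_py := by
  intro value _
  unfold Spec_split_windows_command_string_py split_windows_command_string_py split_windows_command_string_py_alt
  rw [pvMain value.toList [] [] false false 0 (by simp)]
  simp
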